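-- pv_equiv track=rewrite | github.com/stalyndc/tinyseoai-cli | tinyseoai/agents/content_quality.py | _extract_content_insights
-- ===== SOURCE A (Python) =====
-- from typing import Any, Dict, List, Optional
--
-- def _extract_content_insights(issues: List[Dict[str, Any]]) -> List[str]:
--     """Extract content quality insights."""
--     insights = []
--
--     # Title insights
--     title_issues = [i for i in issues if "title" in i.get("type", "").lower()]
--     if title_issues:
--         insights.append(
--             f"Content Alert: {len(title_issues)} title tag issues - titles are critical for rankings"
--         )
--
--     # Meta description insights
--     meta_issues = [
--         i for i in issues if "meta" in i.get("type", "").lower() and "description" in i.get("type", "").lower()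
--     ]
--     if meta_issues:
--         insights.append(
--             f"Found {len(meta_issues)} meta description issues - improve click-through rates with better descriptions"
--         )
--
--     # Heading insights
--     heading_issues = [i for i in issues if "heading" in i.get("type", "").lower() or "h1" in i.get("type", "").lower()]
--     if heading_issues:
--         insights.append(
--             f"Structure Issue: {len(heading_issues)} heading problems - proper hierarchy improves SEO and readability"
--         )
--
--     return insights
-- ===== SOURCE B (Python) =====
-- from typing import Any, Dict, List, Optional
--
-- def _extract_content_insights(issues: List[Dict[str, Any]]) -> List[str]:
--     """Extract content quality insights (single pass with three counters)."""
--     title = meta = heading = 0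
--     for i in issues:
--         t = i.get("type", "").lower()
--         if "title" in t:
--             title += 1
--         if "meta" in t and "description" in t:
--             meta += 1
--         if "heading" in t or "h1" in t:
--             heading += 1
--     insights = []
--     if title:
--         insights.append(f"Content Alert: {title} title tag issues - titles are critical for rankings")
--     if meta:
--         insights.append(f"Found {meta} meta description issues - improve click-through rates with better descriptions")
--     if heading:
--         insights.append(f"Structure Issue: {heading} heading problems - proper hierarchy improves SEO and readability")
--     return insights
-- ===== Notes on version B (the rewrite author's own statement) =====
-- stated objective: alternative
-- what changed: Replaces three separate list-comprehension scans (each recomputing i.get('type','').lower()) with one loop over issues that lowers each type once and increments three counters, then emits the same messages from the counts.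
import Mathlib
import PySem

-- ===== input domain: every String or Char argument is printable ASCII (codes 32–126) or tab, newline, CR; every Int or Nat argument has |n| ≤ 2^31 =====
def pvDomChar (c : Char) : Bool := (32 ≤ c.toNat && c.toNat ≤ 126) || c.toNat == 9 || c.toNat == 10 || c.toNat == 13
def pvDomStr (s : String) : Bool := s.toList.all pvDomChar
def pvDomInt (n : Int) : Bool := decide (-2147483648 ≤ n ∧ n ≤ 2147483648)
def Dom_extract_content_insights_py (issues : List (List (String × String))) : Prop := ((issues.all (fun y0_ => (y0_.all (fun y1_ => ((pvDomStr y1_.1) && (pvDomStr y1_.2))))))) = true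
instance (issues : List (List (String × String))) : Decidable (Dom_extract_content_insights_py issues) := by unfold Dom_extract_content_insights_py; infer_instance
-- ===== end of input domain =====

-- ===== PORT A =====
-- B changes the decomposition: A makes three filter passes, B one counting pass (same messages).
def pvTypeLower (i : List (String × String)) : String :=
  PySem.Str.lower (PySem.Dict.getD (PySem.Dict.mk i) "type" "")

def extract_content_insights_py (issues : List (List (String × String))) : List String :=
  let insights : List String := []
  let title_issues := issues.filter (fun i => PySem.Str.isIn "title" (pvTypeLower i))
  let insights := if title_issues.isEmpty then insights else
    insights ++ ["Content Alert: " ++ PySem.Int.toStr (title_issues.length : Int) ++ " title tag issues - titles are critical for rankings"]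
  let meta_issues := issues.filter (fun i => PySem.Str.isIn "meta" (pvTypeLower i) && PySem.Str.isIn "description" (pvTypeLower i))
  let insights := if meta_issues.isEmpty then insights else
    insights ++ ["Found " ++ PySem.Int.toStr (meta_issues.length : Int) ++ " meta description issues - improve click-through rates with better descriptions"]
  let heading_issues := issues.filter (fun i => PySem.Str.isIn "heading" (pvTypeLower i) || PySem.Str.isIn "h1" (pvTypeLower i))
  let insights := if heading_issues.isEmpty then insights else
    insights ++ ["Structure Issue: " ++ PySem.Int.toStr (heading_issues.length : Int) ++ " heading problems - proper hierarchy improves SEO and readability"]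
  insights

-- ===== PORT B =====
def extract_content_insights_py_alt (issues : List (List (String × String))) : List String :=
  let cs : Nat × Nat × Nat := issues.foldl (fun acc i =>
    let t := PySem.Str.lower (PySem.Dict.getD (PySem.Dict.mk i) "type" "")
    let acc := if PySem.Str.isIn "title" t then (acc.1 + 1, acc.2.1, acc.2.2) else acc
    let acc := if PySem.Str.isIn "meta" t && PySem.Str.isIn "description" t then (acc.1, acc.2.1 + 1, acc.2.2) else acc
    if PySem.Str.isIn "heading" t || PySem.Str.isIn "h1" t then (acc.1, acc.2.1, acc.2.2 + 1) else acc) (0, 0, 0)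
  let insights : List String := []
  let insights := if cs.1 ≠ 0 then
    insights ++ ["Content Alert: " ++ PySem.Int.toStr (cs.1 : Int) ++ " title tag issues - titles are critical for rankings"] else insights
  let insights := if cs.2.1 ≠ 0 then
    insights ++ ["Found " ++ PySem.Int.toStr (cs.2.1 : Int) ++ " meta description issues - improve click-through rates with better descriptions"] else insights
  let insights := if cs.2.2 ≠ 0 then
    insights ++ ["Structure Issue: " ++ PySem.Int.toStr (cs.2.2 : Int) ++ " heading problems - proper hierarchy improves SEO and readability"] else insights
  insights

-- ===== PRECONDITION & SPEC =====
def Spec_extract_content_insights_py (issues : List (List (String × String))) (out : List String) : Prop := out = extract_content_insights_py_alt issues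
instance (issues : List (List (String × String))) (out : List String) : Decidable (Spec_extract_content_insights_py issues out) := by unfold Spec_extract_content_insights_py; infer_instance

-- ===== CLAIM =====
def Claim_equal_extract_content_insights_py : Prop := ∀ (issues : List (List (String × String))), Dom_extract_content_insights_py issues → Spec_extract_content_insights_py issues (extract_content_insights_py issues)

-- ===== LEMMAS AND PROOFS =====
def pvP1 (i : List (String × String)) : Bool := PySem.Str.isIn "title" (pvTypeLower i)
def pvP2 (i : List (String × String)) : Bool := PySem.Str.isIn "meta" (pvTypeLower i) && PySem.Str.isIn "description" (pvTypeLower i)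
def pvP3 (i : List (String × String)) : Bool := PySem.Str.isIn "heading" (pvTypeLower i) || PySem.Str.isIn "h1" (pvTypeLower i)

theorem pv_fold_simple (issues : List (List (String × String))) (a b c : Nat) :
    issues.foldl (fun (acc : Nat × Nat × Nat) i =>
      (acc.1 + (if pvP1 i then 1 else 0), acc.2.1 + (if pvP2 i then 1 else 0), acc.2.2 + (if pvP3 i then 1 else 0))) (a, b, c)
    = (a + issues.countP pvP1, b + issues.countP pvP2, c + issues.countP pvP3) := by
  induction issues generalizing a b c with
  | nil => simp
  | cons hd tl ih =>
    simp only [List.foldl_cons, List.countP_cons]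
    rw [ih]
    cases h1 : pvP1 hd <;> cases h2 : pvP2 hd <;> cases h3 : pvP3 hd <;>
      simp [h1, h2, h3, Prod.ext_iff] <;> omega

theorem pv_fold_counts (issues : List (List (String × String))) (a b c : Nat) :
    issues.foldl (fun acc i =>
      let t := PySem.Str.lower (PySem.Dict.getD (PySem.Dict.mk i) "type" "")
      let acc := if PySem.Str.isIn "title" t then (acc.1 + 1, acc.2.1, acc.2.2) else acc
      let acc := if PySem.Str.isIn "meta" t && PySem.Str.isIn "description" t then (acc.1, acc.2.1 + 1, acc.2.2) else acc
      if PySem.Str.isIn "heading" t || PySem.Str.isIn "h1" t then (acc.1, acc.2.1, acc.2.2 + 1) else acc) (a, b, c)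
    = (a + issues.countP pvP1, b + issues.countP pvP2, c + issues.countP pvP3) := by
  have hf : (fun (acc : Nat × Nat × Nat) i =>
      let t := PySem.Str.lower (PySem.Dict.getD (PySem.Dict.mk i) "type" "")
      let acc := if PySem.Str.isIn "title" t then (acc.1 + 1, acc.2.1, acc.2.2) else acc
      let acc := if PySem.Str.isIn "meta" t && PySem.Str.isIn "description" t then (acc.1, acc.2.1 + 1, acc.2.2) else acc
      if PySem.Str.isIn "heading" t || PySem.Str.isIn "h1" t then (acc.1, acc.2.1, acc.2.2 + 1) else acc)
      = (fun (acc : Nat × Nat × Nat) i =>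
      (acc.1 + (if pvP1 i then 1 else 0), acc.2.1 + (if pvP2 i then 1 else 0), acc.2.2 + (if pvP3 i then 1 else 0))) := by
    funext acc i
    simp only [pvP1, pvP2, pvP3, pvTypeLower]
    split_ifs <;> simp
  rw [hf, pv_fold_simple]

theorem pv_spec' (issues : List (List (String × String))) :
    extract_content_insights_py issues = extract_content_insights_py_alt issues := by
  unfold extract_content_insights_py extract_content_insights_py_alt
  rw [pv_fold_counts]
  have e1 : issues.filter (fun i => PySem.Str.isIn "title" (pvTypeLower i)) = issues.filter pvP1 := rfl
  have e2 : issues.filter (fun i => PySem.Str.isIn "meta" (pvTypeLower i) && PySem.Str.isIn "description" (pvTypeLower i)) = issues.filter pvP2 := rfl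
  have e3 : issues.filter (fun i => PySem.Str.isIn "heading" (pvTypeLower i) || PySem.Str.isIn "h1" (pvTypeLower i)) = issues.filter pvP3 := rfl
  simp only [e1, e2, e3, List.isEmpty_iff_length_eq_zero, ← List.countP_eq_length_filter,
    Nat.zero_add, ne_eq]
  split_ifs <;> simp_all

-- ===== VERDICT =====
theorem extract_content_insights_py_spec : Claim_equal_extract_content_insights_py := by
  intro issues _
  unfold Spec_extract_content_insights_py
  exact pv_spec' issues
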